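-- pv_equiv track=rewrite | github.com/sanyi1963bp/konyvkivonatolo | scraper.py | _normalize_description_text
-- ===== SOURCE A (Python) =====
-- def _normalize_description_text(text: str) -> str:
--     """Normalizálja a leírás szöveget, összeolvasztva a Label és : érték sorokat."""
--     lines = text.split("\n")
--     merged_lines = []
--     i = 0
--     while i < len(lines):
--         line = lines[i].strip()
--         if i + 1 < len(lines) and lines[i + 1].strip().startswith(":"):
--             merged_line = line + lines[i + 1].strip()
--             merged_lines.append(merged_line)
--             i += 2
--         else:
--             merged_lines.append(line)
--             i += 1
--     return "\n".join(merged_lines)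
-- ===== SOURCE B (Python) =====
-- def _normalize_description_text(text: str) -> str:
--     """Single forward pass: append stripped lines; a colon-prefixed line glues onto the
--     previous output line unless that line was itself just produced by a glue."""
--     result = []
--     just_merged = False
--     for raw in text.split("\n"):
--         s = raw.strip()
--         if s.startswith(":") and result and not just_merged:
--             result[-1] += s
--             just_merged = True
--         else:
--             result.append(s)
--             just_merged = False
--     return "\n".join(result)
-- ===== Notes on version B (the rewrite author's own statement) =====
-- stated objective: simpler
-- what changed: Replaced the index-based while loop with look-ahead (lines[i+1], i += 2) by a single forward fold over the lines with an accumulator and a just_merged flag: a colon-prefixed line is glued onto the previous output line unless that line was itself just produced by a glue.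
import Mathlib
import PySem

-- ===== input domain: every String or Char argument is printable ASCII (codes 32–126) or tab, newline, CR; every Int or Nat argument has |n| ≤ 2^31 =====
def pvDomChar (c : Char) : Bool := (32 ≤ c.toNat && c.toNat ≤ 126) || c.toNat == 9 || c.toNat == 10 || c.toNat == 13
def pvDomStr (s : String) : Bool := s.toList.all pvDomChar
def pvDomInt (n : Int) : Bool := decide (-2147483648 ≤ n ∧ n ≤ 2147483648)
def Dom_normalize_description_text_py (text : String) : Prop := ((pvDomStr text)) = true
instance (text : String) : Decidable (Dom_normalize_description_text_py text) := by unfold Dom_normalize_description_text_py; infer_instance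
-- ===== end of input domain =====

-- B replaces A's index-based while loop with look-ahead by a single forward fold
-- with a just_merged flag; same return value (objective: simpler decomposition).

-- ===== PORT A =====
-- A's while loop with look-ahead on lines[i+1]: recursion consuming one or two lines.
def pvGoA : List (List Char) → List (List Char)
  | [] => []
  | [l] => [PySem.Chars.strip l]
  | l :: l2 :: rest =>
    if PySem.Chars.startswith (PySem.Chars.strip l2) [':'] then
      (PySem.Chars.strip l ++ PySem.Chars.strip l2) :: pvGoA rest
    else
      PySem.Chars.strip l :: pvGoA (l2 :: rest)

def normalize_description_text_py (text : String) : String :=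
  String.ofList (PySem.Chars.join ['\n'] (pvGoA (PySem.Chars.splitOn text.toList ['\n'])))

-- ===== PORT B =====
-- one step of B's for-loop: state = (result, just_merged)
def pvStepB (st : List (List Char) × Bool) (raw : List Char) : List (List Char) × Bool :=
  let s := PySem.Chars.strip raw
  if PySem.Chars.startswith s [':'] && !st.1.isEmpty && !st.2 then
    (st.1.dropLast ++ [st.1.getLastD [] ++ s], true)   -- result[-1] += s
  else
    (st.1 ++ [s], false)                               -- result.append(s)

def normalize_description_text_py_alt (text : String) : String :=
  String.ofList (PySem.Chars.join ['\n']
    ((PySem.Chars.splitOn text.toList ['\n']).foldl pvStepB ([], false)).1)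

-- ===== PRECONDITION & SPEC =====
def Spec_normalize_description_text_py (text : String) (out : String) : Prop := out = normalize_description_text_py_alt text
instance (text : String) (out : String) : Decidable (Spec_normalize_description_text_py text out) := by unfold Spec_normalize_description_text_py; infer_instance

-- ===== CLAIM (what is proved, stated in full; the proofs are below) =====
def Claim_equal_normalize_description_text_py : Prop := ∀ (text : String), Dom_normalize_description_text_py text → Spec_normalize_description_text_py text (normalize_description_text_py text)

-- ===== LEMMAS AND PROOFS =====

-- with the flag set, the step always appends and clears the flag
theorem pvStepB_true (acc : List (List Char)) (l : List Char) :
    pvStepB (acc, true) l = (acc ++ [PySem.Chars.strip l], false) := by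
  simp [pvStepB]

-- on a non-':' line the flag value is irrelevant
theorem pvStepB_false_notcolon (acc : List (List Char)) (l : List Char)
    (h : PySem.Chars.startswith (PySem.Chars.strip l) [':'] = false) :
    pvStepB (acc, false) l = (acc ++ [PySem.Chars.strip l], false) := by
  simp [pvStepB, h]

-- with an empty result the flag value is irrelevant
theorem pvStepB_nil_false (l : List Char) :
    pvStepB ([], false) l = pvStepB ([], true) l := by
  simp [pvStepB]

-- loop invariant: starting from a flag-true state, B's fold produces A's merge of the rest
theorem pvFoldB_eq (ls : List (List Char)) :
    ∀ acc : List (List Char), (ls.foldl pvStepB (acc, true)).1 = acc ++ pvGoA ls := by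
  induction ls using pvGoA.induct with
  | case1 => intro acc; simp [pvGoA]
  | case2 l => intro acc; simp [List.foldl, pvStepB_true, pvGoA]
  | case3 l l2 rest h ih =>
      intro acc
      have h2 : pvStepB (acc ++ [PySem.Chars.strip l], false) l2 =
          (acc ++ [PySem.Chars.strip l ++ PySem.Chars.strip l2], true) := by
        simp [pvStepB, h]
      simp only [List.foldl, pvStepB_true, h2, ih, pvGoA, h, if_pos]
      simp
  | case4 l l2 rest h ih =>
      intro acc
      simp only [List.foldl, pvStepB_true,
        pvStepB_false_notcolon _ _ (by simpa using h)]
      have := ih (acc ++ [PySem.Chars.strip l])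
      simp only [List.foldl, pvStepB_true] at this
      simpa [pvGoA, h] using this

theorem pvFoldB_main (ls : List (List Char)) :
    (ls.foldl pvStepB ([], false)).1 = pvGoA ls := by
  cases ls with
  | nil => rfl
  | cons l t =>
      have : (l :: t).foldl pvStepB ([], false) = (l :: t).foldl pvStepB ([], true) := by
        simp [List.foldl, pvStepB_nil_false]
      rw [this]
      simpa using pvFoldB_eq (l :: t) []

-- ===== VERDICT (by name: the statement is the Claim_ definition above) =====
theorem normalize_description_text_py_spec : Claim_equal_normalize_description_text_py := by
  intro text _
  unfold Spec_normalize_description_text_py normalize_description_text_py normalize_description_text_py_alt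
  rw [pvFoldB_main]
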